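-- pv_equiv track=rewrite | github.com/kmiikki/rpi-camera | python/thermoga.py | last_number_pos
-- ===== SOURCE A (Python) =====
-- primary = '.txt'
--
-- def last_number_pos(s):
--     ''' Return the position where the last number starts in a string and
--         the length of the number. Return (-1, -1) if no number is found.
--         String should as a filename: 'stem.ext'.
--     '''
--     numpos = -1
--     length = -1
--     ext_length = len(primary)
--     stem = s[:len(s)-ext_length]
--
--     i = 0
--     for ch in reversed(stem):
--         if not ch.isdigit():
--             break
--         i += 1
--     if i > 0:
--         numpos = len(s)-(ext_length+i)
--         length = i
--
--     return numpos, length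
-- ===== SOURCE B (Python) =====
-- primary = '.txt'
--
-- def last_number_pos(s):
--     ''' Forward single scan: track the index of the last non-digit char in the
--         stem; the trailing digit run is everything after it. '''
--     stem = s[:len(s)-len(primary)]
--     last_nd = -1
--     i = 0
--     for ch in stem:
--         if not ch.isdigit():
--             last_nd = i
--         i += 1
--     n = len(stem) - 1 - last_nd
--     if n > 0:
--         return len(s) - (len(primary) + n), n
--     return -1, -1
-- ===== Notes on version B (the rewrite author's own statement) =====
-- stated objective: alternative
-- what changed: Replaces the backward digit-counting loop over reversed(stem) with a single forward scan that maintains the index of the last non-digit character; the trailing-number length is derived as len(stem)-1-last_nondigit.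
import Mathlib
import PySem

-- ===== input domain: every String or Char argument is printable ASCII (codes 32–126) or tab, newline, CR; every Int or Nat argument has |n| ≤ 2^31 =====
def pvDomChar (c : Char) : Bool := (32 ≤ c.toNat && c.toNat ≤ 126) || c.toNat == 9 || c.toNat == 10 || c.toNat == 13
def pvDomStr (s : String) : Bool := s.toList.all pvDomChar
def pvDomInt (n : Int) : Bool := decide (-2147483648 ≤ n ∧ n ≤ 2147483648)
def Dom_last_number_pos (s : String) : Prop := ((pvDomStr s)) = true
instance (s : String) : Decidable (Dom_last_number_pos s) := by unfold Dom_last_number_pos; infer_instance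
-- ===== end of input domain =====

-- B replaces A's backward digit-count over reversed(stem) by one forward scan keeping
-- the index of the last non-digit character (objective: alternative, same cost).

-- ===== PORT A =====
def pvPrimary : String := ".txt"

-- A's 'for ch in reversed(stem): if not ch.isdigit(): break; i += 1'
def pvALoop : List Char → Int → Int
  | [], i => i
  | c :: rest, i => if ¬ PySem.Chars.isdigit c then i else pvALoop rest (i + 1)

def last_number_pos (s : String) : Int × Int :=
  let numpos : Int := -1
  let length : Int := -1
  let ext_length : Int := PySem.Str.len pvPrimary
  let stem : List Char := PySem.Chars.slice s.toList none (some (PySem.List.len s.toList - ext_length))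
  let i : Int := pvALoop stem.reverse 0
  if i > 0 then
    (PySem.List.len s.toList - (ext_length + i), i)
  else
    (numpos, length)

-- ===== PORT B =====
-- B's forward scan: state (i, last_nd); last_nd = index of last non-digit seen.
def pvBStep (st : Int × Int) (c : Char) : Int × Int :=
  (st.1 + 1, if ¬ PySem.Chars.isdigit c then st.1 else st.2)

def last_number_pos_alt (s : String) : Int × Int :=
  let stem : List Char := PySem.Chars.slice s.toList none (some (PySem.List.len s.toList - PySem.Str.len pvPrimary))
  let last_nd : Int := (stem.foldl pvBStep (0, -1)).2
  let n : Int := PySem.List.len stem - 1 - last_nd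
  if n > 0 then
    (PySem.List.len s.toList - (PySem.Str.len pvPrimary + n), n)
  else
    (-1, -1)

-- ===== PRECONDITION & SPEC =====
def Spec_last_number_pos (s : String) (out : Int × Int) : Prop := out = last_number_pos_alt s
instance (s : String) (out : Int × Int) : Decidable (Spec_last_number_pos s out) := by unfold Spec_last_number_pos; infer_instance

-- ===== CLAIM (what is proved, stated in full; the proofs are below) =====
def Claim_equal_last_number_pos : Prop := ∀ (s : String), Dom_last_number_pos s → Spec_last_number_pos s (last_number_pos s)

-- ===== LEMMAS AND PROOFS =====

lemma pvALoop_eq (cs : List Char) (i : Int) :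
    pvALoop cs i = i + ((cs.takeWhile PySem.Chars.isdigit).length : Int) := by
  induction cs generalizing i with
  | nil => simp [pvALoop]
  | cons c rest ih =>
      by_cases h : PySem.Chars.isdigit c
      · simp [pvALoop, h, ih]; ring
      · simp [pvALoop, h]

lemma pvBStep_fst (cs : List Char) (a b : Int) :
    (cs.foldl pvBStep (a, b)).1 = a + cs.length := by
  induction cs generalizing a b with
  | nil => simp
  | cons c rest ih => simp [pvBStep, ih]; ring

lemma pvBStep_snd (cs : List Char) :
    (cs.length : Int) - 1 - (cs.foldl pvBStep (0, -1)).2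
      = ((cs.reverse.takeWhile PySem.Chars.isdigit).length : Int) := by
  induction cs using List.reverseRecOn with
  | nil => simp
  | append_singleton rest c ih =>
      rw [List.foldl_append]
      by_cases h : PySem.Chars.isdigit c
      · simp [pvBStep, h]
        push_cast at ih
        omega
      · have hf := pvBStep_fst rest 0 (-1)
        simp [pvBStep, h, hf]

lemma pv_counts_agree (cs : List Char) :
    pvALoop cs.reverse 0 = (cs.length : Int) - 1 - (cs.foldl pvBStep (0, -1)).2 := by
  rw [pvALoop_eq, pvBStep_snd]; ring

-- ===== VERDICT (by name: the statement is the Claim_ definition above) =====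
theorem last_number_pos_spec : Claim_equal_last_number_pos := by
  intro s _
  unfold Spec_last_number_pos last_number_pos last_number_pos_alt
  simp only [PySem.List.len_eq]
  generalize PySem.Chars.slice s.toList none (some ((s.toList.length : Int) - PySem.Str.len pvPrimary)) = stem
  rw [pv_counts_agree stem]
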